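-- pv_equiv track=rewrite | github.com/mliezun/aoc | 2024/day-22/solve.py | calculate_2000th_secret
-- ===== SOURCE A (Python) =====
-- def evolve_secret(secret):
--     MODULO = 16777216
--
--     secret ^= secret * 64
--     secret %= MODULO
--
--     secret ^= secret // 32
--     secret %= MODULO
--
--     secret ^= secret * 2048
--     secret %= MODULO
--
--     return secret
--
-- def calculate_2000th_secret(initial_secrets):
--     results = []
--
--     for initial_secret in initial_secrets:
--         secret = initial_secret
--         for _ in range(2000):
--             secret = evolve_secret(secret)
--         results.append(secret)
--
--     return sum(results)
-- ===== SOURCE B (Python) =====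
-- def calculate_2000th_secret(initial_secrets):
--     # The evolve step is GF(2)-linear on the low 24 bits (xor, shifts and the
--     # 2^24 mask are linear maps).  Precompute the 2000-fold composition once as
--     # the images of the 24 basis bits; each secret is then handled in O(24) by
--     # xoring the masks of its set bits.
--     M = 16777216
--     masks = []
--     for i in range(24):
--         v = 1 << i
--         for _ in range(2000):
--             v = (v ^ (v << 6)) % M
--             v = (v ^ (v >> 5)) % M
--             v = (v ^ (v << 11)) % M
--         masks.append(v)
--     total = 0
--     for s in initial_secrets:
--         b = s % M
--         r = 0
--         for i, m in enumerate(masks):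
--             if (b >> i) & 1:
--                 r ^= m
--         total += r
--     return total
-- ===== Notes on version B (the rewrite author's own statement) =====
-- stated objective: faster
-- what changed: Exploits that the evolve step is GF(2)-linear on the low 24 bits: B precomputes the 2000-step map once as the images of the 24 basis bits and then handles each secret by xoring the masks of its set bits, instead of running 2000 evolve steps per secret.
import Mathlib
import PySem

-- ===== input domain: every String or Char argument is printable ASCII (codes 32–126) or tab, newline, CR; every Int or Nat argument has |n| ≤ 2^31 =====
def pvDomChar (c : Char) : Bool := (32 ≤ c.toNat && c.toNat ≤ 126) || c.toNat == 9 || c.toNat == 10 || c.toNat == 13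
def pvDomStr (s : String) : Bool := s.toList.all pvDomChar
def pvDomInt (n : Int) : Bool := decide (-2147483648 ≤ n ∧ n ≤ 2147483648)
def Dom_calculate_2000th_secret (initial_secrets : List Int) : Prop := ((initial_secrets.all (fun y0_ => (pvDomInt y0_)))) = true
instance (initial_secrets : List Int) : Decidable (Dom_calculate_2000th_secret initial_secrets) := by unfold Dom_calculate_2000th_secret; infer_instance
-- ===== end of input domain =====

-- B precomputes the 2000-step evolution (GF(2)-linear on the low 24 bits) as the
-- images of the 24 basis bits and applies it per secret by xoring masks, instead
-- of running 2000 evolve steps per secret.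


-- ===== PORT A =====
def evolve_secret (secret : Int) : Int :=
  let s1 := PySem.Int.mod (PySem.Int.bxor secret (secret * 64)) 16777216
  let s2 := PySem.Int.mod (PySem.Int.bxor s1 (PySem.Int.floordiv s1 32)) 16777216
  PySem.Int.mod (PySem.Int.bxor s2 (s2 * 2048)) 16777216

def calculate_2000th_secret (initial_secrets : List Int) : Int :=
  let results := initial_secrets.foldl
    (fun results initial_secret =>
      results ++ [(List.range 2000).foldl (fun secret _ => evolve_secret secret) initial_secret])
    []
  results.sum

-- ===== PORT B =====
-- the mask precompute loop of Source B: masks[i] = 2000-fold evolution of 1 << i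
-- (Python's << / >> are Lean's <<< / >>> on Int; the loop index i is 0..23, a Nat shift amount)
def pvMasksB : List Int :=
  (List.range 24).foldl (fun masks i =>
    masks ++ [(List.range 2000).foldl (fun v _ =>
      let v1 := PySem.Int.mod (PySem.Int.bxor v (v <<< (6:Nat))) 16777216
      let v2 := PySem.Int.mod (PySem.Int.bxor v1 (v1 >>> (5:Nat))) 16777216
      PySem.Int.mod (PySem.Int.bxor v2 (v2 <<< (11:Nat))) 16777216)
      ((1:Int) <<< i)]) []

-- per-secret loop of Source B: b = s % 2**24, then xor the masks of b's set bits
-- (an enumerate index is ≥ 0, so Python's `b >> i` is `b >>> i.toNat`)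
def calculate_2000th_secret_alt (initial_secrets : List Int) : Int :=
  initial_secrets.foldl (fun total s =>
    let b := PySem.Int.mod s 16777216
    total + (PySem.List.enumerate pvMasksB).foldl
      (fun r im => if PySem.Int.band (b >>> im.1.toNat) 1 ≠ 0 then PySem.Int.bxor r im.2 else r) 0) 0

-- ===== PRECONDITION & SPEC =====
def Spec_calculate_2000th_secret (initial_secrets : List Int) (out : Int) : Prop := out = calculate_2000th_secret_alt initial_secrets
instance (initial_secrets : List Int) (out : Int) : Decidable (Spec_calculate_2000th_secret initial_secrets out) := by unfold Spec_calculate_2000th_secret; infer_instance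

-- ===== CLAIM (what is proved, stated in full; the proofs are below) =====
def Claim_equal_calculate_2000th_secret : Prop := ∀ (initial_secrets : List Int), Dom_calculate_2000th_secret initial_secrets → Spec_calculate_2000th_secret initial_secrets (calculate_2000th_secret initial_secrets)

-- ===== LEMMAS AND PROOFS =====

-- Nat model of one evolve step (both ports' step functions cast to it)
def pvSub1 (v : Nat) : Nat := (v ^^^ (v <<< 6)) % 16777216
def pvSub2 (v : Nat) : Nat := (v ^^^ (v >>> 5)) % 16777216
def pvSub3 (v : Nat) : Nat := (v ^^^ (v <<< 11)) % 16777216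
def pvStep (v : Nat) : Nat := pvSub3 (pvSub2 (pvSub1 v))
def pvEN (v : Nat) : Nat := pvStep^[2000] v

-- B's per-secret value (port B's inner fold with the let inlined; defeq)
def pvG (s : Int) : Int :=
  (PySem.List.enumerate pvMasksB).foldl
    (fun r im => if PySem.Int.band ((PySem.Int.mod s 16777216) >>> im.1.toNat) 1 ≠ 0 then PySem.Int.bxor r im.2 else r) 0

-- GF(2)-linearity of the three substeps, the step, and its iterates
theorem pvSub1_lin (x y : Nat) : pvSub1 (x ^^^ y) = pvSub1 x ^^^ pvSub1 y := by
  unfold pvSub1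
  have h : (16777216:Nat) = 2^24 := by norm_num
  rw [h]
  apply Nat.eq_of_testBit_eq
  intro i
  simp only [Nat.testBit_mod_two_pow, Nat.testBit_xor, Nat.testBit_shiftLeft]
  by_cases h24 : i < 24 <;> by_cases h6 : i ≥ 6 <;>
    simp [h24, h6] <;>
    cases x.testBit i <;> cases y.testBit i <;>
    cases x.testBit (i-6) <;> cases y.testBit (i-6) <;> rfl

theorem pvSub2_lin (x y : Nat) : pvSub2 (x ^^^ y) = pvSub2 x ^^^ pvSub2 y := by
  unfold pvSub2
  have h : (16777216:Nat) = 2^24 := by norm_num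
  rw [h]
  apply Nat.eq_of_testBit_eq
  intro i
  simp only [Nat.testBit_mod_two_pow, Nat.testBit_xor, Nat.testBit_shiftRight]
  by_cases h24 : i < 24 <;>
    simp [h24] <;>
    cases x.testBit i <;> cases y.testBit i <;>
    cases x.testBit (5+i) <;> cases y.testBit (5+i) <;> rfl

theorem pvSub3_lin (x y : Nat) : pvSub3 (x ^^^ y) = pvSub3 x ^^^ pvSub3 y := by
  unfold pvSub3
  have h : (16777216:Nat) = 2^24 := by norm_num
  rw [h]
  apply Nat.eq_of_testBit_eq
  intro i
  simp only [Nat.testBit_mod_two_pow, Nat.testBit_xor, Nat.testBit_shiftLeft]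
  by_cases h24 : i < 24 <;> by_cases h11 : i ≥ 11 <;>
    simp [h24, h11] <;>
    cases x.testBit i <;> cases y.testBit i <;>
    cases x.testBit (i-11) <;> cases y.testBit (i-11) <;> rfl

theorem pvStep_lin (x y : Nat) : pvStep (x ^^^ y) = pvStep x ^^^ pvStep y := by
  simp [pvStep, pvSub1_lin, pvSub2_lin, pvSub3_lin]

theorem pvIter_lin (n : Nat) : ∀ x y : Nat, pvStep^[n] (x ^^^ y) = pvStep^[n] x ^^^ pvStep^[n] y := by
  induction n with
  | zero => intro x y; rfl
  | succ k ih =>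
    intro x y
    rw [Function.iterate_succ_apply, Function.iterate_succ_apply, Function.iterate_succ_apply,
      pvStep_lin, ih]

theorem pvEN_lin (x y : Nat) : pvEN (x ^^^ y) = pvEN x ^^^ pvEN y := pvIter_lin 2000 x y

theorem pvIter_zero (n : Nat) : pvStep^[n] 0 = 0 := by
  induction n with
  | zero => rfl
  | succ k ih => rw [Function.iterate_succ_apply, show pvStep 0 = 0 from rfl, ih]

theorem pvEN_zero : pvEN 0 = 0 := pvIter_zero 2000

-- casts of Python mod to Nat
theorem pvModCast (m : Nat) : PySem.Int.mod (m : Int) 16777216 = ((m % 16777216 : Nat) : Int) := by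
  exact_mod_cast PySem.Int.mod_natCast m 16777216

-- A's evolve on a Nat cast is the Nat step
theorem pvCastA (n : Nat) : evolve_secret (n : Int) = ((pvStep n : Nat) : Int) := by
  simp only [evolve_secret]
  unfold pvStep
  have e1 : PySem.Int.mod (PySem.Int.bxor (n:Int) ((n:Int) * 64)) 16777216 = ((pvSub1 n : Nat) : Int) := by
    have h : ((n:Int) * 64) = ((n * 64 : Nat) : Int) := by push_cast; ring
    rw [h, PySem.Int.bxor_natCast, pvModCast]
    unfold pvSub1
    rw [Nat.shiftLeft_eq]
  rw [e1]
  have e2 : PySem.Int.mod (PySem.Int.bxor ((pvSub1 n : Nat) : Int) (PySem.Int.floordiv ((pvSub1 n : Nat) : Int) 32)) 16777216 = ((pvSub2 (pvSub1 n) : Nat) : Int) := by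
    have h : PySem.Int.floordiv ((pvSub1 n : Nat) : Int) 32 = ((pvSub1 n / 32 : Nat) : Int) := by
      exact_mod_cast PySem.Int.floordiv_natCast (pvSub1 n) 32
    rw [h, PySem.Int.bxor_natCast, pvModCast]
    unfold pvSub2
    rw [Nat.shiftRight_eq_div_pow]
  rw [e2]
  have h : (((pvSub2 (pvSub1 n)) : Nat) : Int) * 2048 = ((pvSub2 (pvSub1 n) * 2048 : Nat) : Int) := by push_cast; ring
  rw [h, PySem.Int.bxor_natCast, pvModCast]
  unfold pvSub3
  rw [Nat.shiftLeft_eq]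

-- Nat congruences: the first substep depends only on the low 24 bits
theorem pvNK1 (n : Nat) : (n ^^^ (n * 64)) % 16777216 = ((n % 16777216) ^^^ ((n % 16777216) * 64)) % 16777216 := by
  have h64 : ∀ m : Nat, m * 64 = m <<< 6 := fun m => by rw [Nat.shiftLeft_eq]
  have h : (16777216:Nat) = 2^24 := by norm_num
  rw [h64, h64, h]
  apply Nat.eq_of_testBit_eq
  intro i
  simp only [Nat.testBit_mod_two_pow, Nat.testBit_xor, Nat.testBit_shiftLeft]
  by_cases h24 : i < 24
  · by_cases h6 : 6 ≤ i
    · have h624 : i - 6 < 24 := by omega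
      simp [h24, h6, h624]
    · simp [h24, h6]
  · simp [h24]

-- complement below 2^k is xor with the all-ones mask
theorem pvCompl (k : Nat) : ∀ a, a < 2^k → a ^^^ (2^k - 1) = 2^k - 1 - a := by
  induction k with
  | zero => intro a h; interval_cases a <;> simp
  | succ k ih =>
    intro a h
    have hp : (2:Nat)^(k+1) = 2^k * 2 := Nat.pow_succ 2 k
    have h1 : (1:Nat) ≤ 2^k := Nat.one_le_two_pow
    have hq : a / 2 < 2^k := by omega
    have ihq := ih (a/2) hq
    have hm : 2^(k+1) - 1 = Nat.bit true (2^k - 1) := by simp [Nat.bit_val]; omega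
    have hb : a % 2 = 0 ∨ a % 2 = 1 := by omega
    rcases hb with hb | hb
    · have ha : a = Nat.bit false (a/2) := by simp [Nat.bit_val]; omega
      rw [ha, hm, Nat.xor_bit]
      simp only [Nat.bit_val, ihq]
      simp
      omega
    · have ha : a = Nat.bit true (a/2) := by simp [Nat.bit_val]; omega
      rw [ha, hm, Nat.xor_bit]
      simp only [Nat.bit_val, ihq]
      simp
      omega

-- negative case: the low 24 bits of -(m+1) are the complement of m's
theorem pvNK2 (m : Nat) :
    (m ^^^ (64 * m + 63)) % 16777216
      = ((16777216 - 1 - m % 16777216) ^^^ ((16777216 - 1 - m % 16777216) * 64)) % 16777216 := by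
  have h : (16777216:Nat) = 2^24 := by norm_num
  have hc : 16777216 - 1 - m % 16777216 = (m % 16777216) ^^^ (16777216 - 1) := by
    rw [h]
    exact (pvCompl 24 (m % (2^24)) (Nat.mod_lt _ (by norm_num))).symm
  have h63 : 64 * m + 63 = (m <<< 6) ||| (2^6 - 1) := by
    have h2 := Nat.two_pow_add_eq_or_of_lt (i := 6) (b := 63) (by norm_num) m
    have h3 : (2:Nat)^6 - 1 = 63 := by norm_num
    rw [h3, Nat.shiftLeft_eq, Nat.mul_comm m (2^6)]
    omega
  have h64 : ∀ x : Nat, x * 64 = x <<< 6 := fun x => by rw [Nat.shiftLeft_eq]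
  rw [hc, h63, h64, h]
  apply Nat.eq_of_testBit_eq
  intro i
  simp only [Nat.testBit_mod_two_pow, Nat.testBit_xor, Nat.testBit_or,
    Nat.testBit_shiftLeft, Nat.testBit_two_pow_sub_one]
  by_cases h24 : i < 24
  · by_cases h6 : 6 ≤ i
    · have h624 : i - 6 < 24 := by omega
      simp [h24, h6, h624, show ¬ i < 6 by omega]
    · simp [h24, h6, show i < 6 by omega]
  · simp [h24]

-- Python % 2^24 / ^ on an arbitrary Int: the first substep only sees the low 24 bits
theorem pvKey (s : Int) :
    PySem.Int.mod (PySem.Int.bxor s (s * 64)) 16777216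
      = PySem.Int.mod (PySem.Int.bxor (((s % 16777216).toNat : Nat) : Int)
          ((((s % 16777216).toNat : Nat) : Int) * 64)) 16777216 := by
  cases s with
  | ofNat n =>
    have he : ((Int.ofNat n) % (16777216:Int)).toNat = n % 16777216 := by
      show ((n:Int) % 16777216).toNat = n % 16777216
      omega
    rw [he]
    have h1 : (Int.ofNat n) * 64 = ((n * 64 : Nat) : Int) := by show (n:Int) * 64 = _; push_cast; ring
    have h2 : ((n % 16777216 : Nat) : Int) * 64 = ((n % 16777216 * 64 : Nat) : Int) := by push_cast; ring
    show PySem.Int.mod (PySem.Int.bxor ((n:Nat):Int) _) _ = _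
    rw [h1, h2, PySem.Int.bxor_natCast, PySem.Int.bxor_natCast, pvModCast, pvModCast, pvNK1]
  | negSucc m =>
    have hr : ((Int.negSucc m) % (16777216:Int)).toNat = 16777216 - 1 - m % 16777216 := by
      rw [Int.negSucc_eq]
      omega
    rw [hr]
    have hmul : Int.negSucc m * 64 = Int.negSucc (64 * m + 63) := by
      rw [Int.negSucc_eq, Int.negSucc_eq]; push_cast; ring
    have hbx : PySem.Int.bxor (Int.negSucc m) (Int.negSucc (64 * m + 63)) = ((m ^^^ (64 * m + 63) : Nat) : Int) := by
      have hn1 : ¬ (0:Int) ≤ Int.negSucc m := by rw [Int.negSucc_eq]; omega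
      have hn2 : ¬ (0:Int) ≤ Int.negSucc (64 * m + 63) := by rw [Int.negSucc_eq]; omega
      unfold PySem.Int.bxor
      rw [if_neg hn1, if_neg hn2]
      have e1 : (-(Int.negSucc m) - 1).toNat = m := by rw [Int.negSucc_eq]; omega
      have e2 : (-(Int.negSucc (64 * m + 63)) - 1).toNat = 64 * m + 63 := by rw [Int.negSucc_eq]; omega
      rw [e1, e2]
    rw [hmul, hbx]
    have h2 : ((16777216 - 1 - m % 16777216 : Nat) : Int) * 64 = ((((16777216 - 1 - m % 16777216) * 64 : Nat)) : Int) := by push_cast; ring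
    rw [h2, PySem.Int.bxor_natCast, pvModCast, pvModCast, pvNK2]

-- A's evolve depends only on the value mod 2^24
theorem pvEvolve_emod (s : Int) : evolve_secret s = ((pvStep ((s % 16777216).toNat) : Nat) : Int) := by
  calc evolve_secret s = evolve_secret (((s % 16777216).toNat : Nat) : Int) := by
        simp only [evolve_secret]
        rw [pvKey s]
    _ = _ := pvCastA _

-- fold over a list ignoring the elements is iteration
theorem pvFoldl_ignore {α β : Type} (l : List α) (f : β → β) (x : β) :
    l.foldl (fun v _ => f v) x = f^[l.length] x := by
  induction l generalizing x with
  | nil => rfl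
  | cons a t ih => simp [List.foldl_cons, ih, Function.iterate_succ_apply]

theorem pvIterA_cast (n : Nat) : ∀ m : Nat, evolve_secret^[n] ((m : Nat) : Int) = ((pvStep^[n] m : Nat) : Int) := by
  induction n with
  | zero => intro m; rfl
  | succ k ih => intro m; rw [Function.iterate_succ_apply, Function.iterate_succ_apply, pvCastA, ih]

-- A's 2000-fold evolution of any Int
theorem pvEA_eq (s : Int) :
    (List.range 2000).foldl (fun secret _ => evolve_secret secret) s
      = ((pvEN ((s % 16777216).toNat) : Nat) : Int) := by
  rw [pvFoldl_ignore, List.length_range]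
  show evolve_secret^[1999+1] s = _
  rw [Function.iterate_succ_apply, pvEvolve_emod s, pvIterA_cast]
  unfold pvEN
  rw [← Function.iterate_succ_apply]

-- B's inline step on a Nat cast is the same Nat step
theorem pvCastB (n : Nat) :
    (let v1 := PySem.Int.mod (PySem.Int.bxor (n : Int) ((n : Int) <<< (6:Nat))) 16777216
     let v2 := PySem.Int.mod (PySem.Int.bxor v1 (v1 >>> (5:Nat))) 16777216
     PySem.Int.mod (PySem.Int.bxor v2 (v2 <<< (11:Nat))) 16777216) = ((pvStep n : Nat) : Int) := by
  show PySem.Int.mod _ 16777216 = _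
  unfold pvStep
  have e1 : PySem.Int.mod (PySem.Int.bxor (n:Int) ((n:Int) <<< (6:Nat))) 16777216 = ((pvSub1 n : Nat) : Int) := by
    rw [← Int.natCast_shiftLeft, PySem.Int.bxor_natCast, pvModCast]
    rfl
  rw [e1]
  have e2 : PySem.Int.mod (PySem.Int.bxor ((pvSub1 n : Nat) : Int) (((pvSub1 n : Nat) : Int) >>> (5:Nat))) 16777216 = ((pvSub2 (pvSub1 n) : Nat) : Int) := by
    rw [← Int.natCast_shiftRight, PySem.Int.bxor_natCast, pvModCast]
    rfl
  rw [e2]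
  rw [← Int.natCast_shiftLeft, PySem.Int.bxor_natCast, pvModCast]
  rfl

theorem pvIterB_cast (n : Nat) : ∀ m : Nat,
    (fun v : Int =>
      let v1 := PySem.Int.mod (PySem.Int.bxor v (v <<< (6:Nat))) 16777216
      let v2 := PySem.Int.mod (PySem.Int.bxor v1 (v1 >>> (5:Nat))) 16777216
      PySem.Int.mod (PySem.Int.bxor v2 (v2 <<< (11:Nat))) 16777216)^[n] ((m : Nat) : Int)
      = ((pvStep^[n] m : Nat) : Int) := by
  induction n with
  | zero => intro m; rfl
  | succ k ih => intro m; rw [Function.iterate_succ_apply, Function.iterate_succ_apply, pvCastB, ih]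

set_option maxRecDepth 16384 in
theorem pvMasksB_eq : pvMasksB = (List.range 24).map (fun i => ((pvEN (1 <<< i) : Nat) : Int)) := by
  have h : pvMasksB = (List.range 24).map (fun (i : Nat) => (List.range 2000).foldl (fun v _ =>
      let v1 := PySem.Int.mod (PySem.Int.bxor v (v <<< (6:Nat))) 16777216
      let v2 := PySem.Int.mod (PySem.Int.bxor v1 (v1 >>> (5:Nat))) 16777216
      PySem.Int.mod (PySem.Int.bxor v2 (v2 <<< (11:Nat))) 16777216)
      ((1:Int) <<< i)) := by
    have h0 := PySem.List.foldl_append_singleton_eq_map (fun i => (List.range 2000).foldl (fun v _ =>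
        let v1 := PySem.Int.mod (PySem.Int.bxor v (v <<< (6:Nat))) 16777216
        let v2 := PySem.Int.mod (PySem.Int.bxor v1 (v1 >>> (5:Nat))) 16777216
        PySem.Int.mod (PySem.Int.bxor v2 (v2 <<< (11:Nat))) 16777216)
        ((1:Int) <<< i)) (List.range 24) ([] : List Int)
    rw [List.nil_append] at h0
    exact h0
  rw [h]
  apply List.map_congr_left
  intro i _
  have h1 : ((1:Int) <<< i) = (((1 <<< i : Nat)) : Int) := by rw [Int.natCast_shiftLeft]; norm_num
  rw [h1, pvFoldl_ignore, List.length_range]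
  exact pvIterB_cast 2000 (1 <<< i)

-- xor with a fresh top bit is addition
theorem pvXorTop (n b : Nat) (h : b < 2^n) : (2^n) ^^^ b = 2^n + b := by
  have h1 : (2:Nat)^n ^^^ b = 2^n ||| b := by
    apply Nat.eq_of_testBit_eq
    intro i
    simp only [Nat.testBit_xor, Nat.testBit_or, Nat.testBit_two_pow]
    by_cases hn : n = i
    · subst hn; simp [Nat.testBit_lt_two_pow h]
    · simp [hn]
  have h2 := Nat.two_pow_add_eq_or_of_lt h 1
  rw [mul_one] at h2
  rw [h1]
  omega

-- the per-secret mask application computes pvEN of the low 24 bits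
theorem pvL24 (n : Nat) (r : Nat) :
    (List.range n).foldl (fun a i => if r.testBit i then a ^^^ pvEN (1 <<< i) else a) 0
      = pvEN (r % 2^n) := by
  induction n with
  | zero => rw [List.range_zero, List.foldl_nil, pow_zero, Nat.mod_one, pvEN_zero]
  | succ n ih =>
    rw [List.range_succ, List.foldl_append, ih]
    have hmm : r % 2^(n+1) = r % 2^n + 2^n * (r / 2^n % 2) := by
      rw [Nat.pow_succ]
      exact Nat.mod_mul
    have htb : r.testBit n = (r / 2^n % 2 != 0) := by
      show (1 &&& r >>> n != 0) = _
      rw [Nat.and_comm, Nat.and_one_is_mod, Nat.shiftRight_eq_div_pow]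
    simp only [List.foldl_cons, List.foldl_nil]
    by_cases hb : r.testBit n
    · rw [if_pos hb]
      rw [htb] at hb
      have h2 : r / 2^n % 2 = 1 := by simp at hb; omega
      have hlt : r % 2^n < 2^n := Nat.mod_lt _ (Nat.two_pow_pos n)
      rw [Nat.one_shiftLeft, ← pvEN_lin, Nat.xor_comm, pvXorTop n _ hlt, hmm, h2, Nat.mul_one, Nat.add_comm]
    · rw [if_neg hb]
      rw [htb] at hb
      have h2 : r / 2^n % 2 = 0 := by simp at hb; omega
      rw [hmm, h2]
      simp

theorem pvEnumFold (r : Nat) : ∀ (k j acc : Nat),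
    (PySem.List.enumerate ((List.range' j k).map (fun i => ((pvEN (1 <<< i) : Nat) : Int))) (j : Int)).foldl
      (fun t im => if PySem.Int.band ((r : Int) >>> ((im.1.toNat : Nat) : Int)) 1 ≠ 0 then PySem.Int.bxor t im.2 else t) ((acc : Nat) : Int)
      = (((List.range' j k).foldl (fun a i => if r.testBit i then a ^^^ pvEN (1 <<< i) else a) acc : Nat) : Int) := by
  intro k
  induction k with
  | zero => intro j acc; rfl
  | succ k ih =>
    intro j acc
    rw [List.range'_succ]
    simp only [List.map_cons]
    rw [show PySem.List.enumerate (((pvEN (1 <<< j) : Nat) : Int) :: (List.range' (j+1) k).map (fun i => ((pvEN (1 <<< i) : Nat) : Int))) (j:Int)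
        = ((j:Int), ((pvEN (1 <<< j) : Nat) : Int)) :: PySem.List.enumerate ((List.range' (j+1) k).map (fun i => ((pvEN (1 <<< i) : Nat) : Int))) ((j:Int)+1) from rfl]
    rw [List.foldl_cons, List.foldl_cons]
    have hc : (PySem.Int.band ((r : Int) >>> (((((j:Int), ((pvEN (1 <<< j) : Nat) : Int)).1.toNat : Nat)) : Int)) 1 ≠ 0) ↔ r.testBit j := by
      show (PySem.Int.band ((r : Int) >>> ((((j:Int)).toNat : Nat) : Int)) 1 ≠ 0) ↔ _
      rw [Int.toNat_natCast, Int.shiftRight_natCast]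
      rw [show (1:Int) = ((1:Nat):Int) from rfl, PySem.Int.band_natCast]
      rw [show r.testBit j = (1 &&& r >>> j != 0) from rfl]
      constructor
      · intro hne
        have : (r >>> j) &&& 1 ≠ 0 := by exact_mod_cast hne
        rw [Nat.and_comm] at this
        simpa using this
      · intro hne
        simp only [bne_iff_ne, ne_eq] at hne
        rw [Nat.and_comm] at hne
        exact_mod_cast hne
    by_cases hb : r.testBit j
    · rw [if_pos (hc.mpr hb), if_pos hb]
      have hx : PySem.Int.bxor ((acc : Nat) : Int) ((pvEN (1 <<< j) : Nat) : Int) = ((acc ^^^ pvEN (1 <<< j) : Nat) : Int) := PySem.Int.bxor_natCast _ _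
      rw [hx, show ((j:Int)+1) = ((j+1 : Nat) : Int) by push_cast; ring]
      exact ih (j+1) (acc ^^^ pvEN (1 <<< j))
    · rw [if_neg (fun h => hb (hc.mp h)), if_neg hb]
      rw [show ((j:Int)+1) = ((j+1 : Nat) : Int) by push_cast; ring]
      exact ih (j+1) acc

-- per-secret equality of the two ports
theorem pvPerSecret (s : Int) :
    (List.range 2000).foldl (fun secret _ => evolve_secret secret) s = pvG s := by
  rw [pvEA_eq s]
  unfold pvG
  have hmod : PySem.Int.mod s 16777216 = (((s % 16777216).toNat : Nat) : Int) := by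
    rw [PySem.Int.mod_eq_emod_of_pos (by norm_num)]
    exact (Int.toNat_of_nonneg (Int.emod_nonneg s (by norm_num))).symm
  rw [hmod, pvMasksB_eq, List.range_eq_range']
  have h0 := pvEnumFold ((s % 16777216).toNat) 24 0 0
  simp only [Nat.cast_zero] at h0
  rw [h0, ← List.range_eq_range', pvL24]
  have hlt : (s % 16777216).toNat < 2^24 := by
    have := Int.emod_lt_of_pos s (b := 16777216) (by norm_num)
    omega
  rw [Nat.mod_eq_of_lt hlt]

-- ===== VERDICT (by name: the statement is the Claim_ definition above) =====
theorem calculate_2000th_secret_spec : Claim_equal_calculate_2000th_secret := by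
  intro l _
  show calculate_2000th_secret l = calculate_2000th_secret_alt l
  have hA : calculate_2000th_secret l
      = (l.map (fun s => (List.range 2000).foldl (fun secret _ => evolve_secret secret) s)).sum := by
    unfold calculate_2000th_secret
    rw [PySem.List.foldl_append_singleton_eq_map, List.nil_append]
  have hB : calculate_2000th_secret_alt l = 0 + (l.map pvG).sum := by
    show l.foldl (fun total s => total + pvG s) 0 = _
    exact PySem.List.foldl_add l pvG 0
  rw [hA, hB, zero_add]
  exact congrArg List.sum (List.map_congr_left fun s _ => pvPerSecret s)
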